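-- pv_equiv track=rewrite | github.com/wlstj23207-coder/cardnews | ductor_bot/messenger/telegram/formatting.py | _convert_blockquotes
-- ===== SOURCE A (Python) =====
-- def _convert_blockquotes(text: str) -> str:
--     """Wrap consecutive ``> `` lines in ``<blockquote>`` tags."""
--     lines = text.split("\n")
--     result: list[str] = []
--     quote_buf: list[str] = []
--     escaped_gt = "&gt; "
--
--     for line in lines:
--         if line.startswith(escaped_gt):
--             quote_buf.append(line[len(escaped_gt) :])
--         else:
--             if quote_buf:
--                 result.append("<blockquote>" + "\n".join(quote_buf) + "</blockquote>")
--                 quote_buf = []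
--             result.append(line)
--     if quote_buf:
--         result.append("<blockquote>" + "\n".join(quote_buf) + "</blockquote>")
--     return "\n".join(result)
-- ===== SOURCE B (Python) =====
-- def _convert_blockquotes(text: str) -> str:
--     """Wrap consecutive ``> `` lines in ``<blockquote>`` tags."""
--     prefix = "&gt; "
--     lines = text.split("\n")
--     n = len(lines)
--     out: list[str] = []
--     i = 0
--     while i < n:
--         if lines[i].startswith(prefix):
--             j = i
--             while j < n and lines[j].startswith(prefix):
--                 j += 1
--             out.append(
--                 "<blockquote>"
--                 + "\n".join(s[len(prefix):] for s in lines[i:j])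
--                 + "</blockquote>"
--             )
--             i = j
--         else:
--             out.append(lines[i])
--             i += 1
--     return "\n".join(out)
-- ===== Notes on version B (the rewrite author's own statement) =====
-- stated objective: alternative
-- what changed: Replaces A's buffer/flush accumulator loop (collect quoted lines, flush the buffer on each non-quoted line and once after the loop) with a two-pointer scan that, at each quoted line, advances a second index to the end of the maximal quoted run and emits the blockquote directly, so no pending-buffer state is carried between iterations.
import Mathlib
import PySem

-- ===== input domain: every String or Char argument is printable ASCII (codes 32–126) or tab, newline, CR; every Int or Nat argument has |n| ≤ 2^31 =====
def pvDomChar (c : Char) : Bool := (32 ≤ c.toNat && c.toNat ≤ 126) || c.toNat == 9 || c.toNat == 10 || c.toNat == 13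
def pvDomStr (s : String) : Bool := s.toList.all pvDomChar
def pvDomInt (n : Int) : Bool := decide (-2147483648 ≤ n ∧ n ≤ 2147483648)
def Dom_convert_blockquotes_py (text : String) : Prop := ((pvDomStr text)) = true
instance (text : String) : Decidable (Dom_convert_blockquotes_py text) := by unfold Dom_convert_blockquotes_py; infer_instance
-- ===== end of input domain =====

-- B replaces A's buffer/flush accumulator loop by a two-pointer scan that emits each maximal
-- quoted run directly (objective: alternative; same output, no speed claim).

-- ===== PORT A =====
-- step of A's for-loop: state = (result, quote_buf)
def bqStepA (st : List String × List String) (line : String) : List String × List String :=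
  if PySem.Str.startswith line "&gt; " then
    (st.1, st.2 ++ [PySem.Str.slice line (some 5) none])
  else
    ((if st.2 ≠ [] then
        st.1 ++ ["<blockquote>" ++ PySem.Str.join "\n" st.2 ++ "</blockquote>"]
      else st.1) ++ [line], [])

def convert_blockquotes_py (text : String) : String :=
  let lines := (PySem.Str.split? text "\n").getD []
  let st := lines.foldl bqStepA ([], [])
  let result :=
    if st.2 ≠ [] then
      st.1 ++ ["<blockquote>" ++ PySem.Str.join "\n" st.2 ++ "</blockquote>"]
    else st.1
  PySem.Str.join "\n" result

-- ===== PORT B =====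
def bqIsQuoted (l : String) : Bool := PySem.Str.startswith l "&gt; "

def bqStrip (s : String) : String := PySem.Str.slice s (some 5) none

-- B's outer while-loop over i, with the inner while-loop j finding the end of the quoted run:
-- recursion on the remaining suffix lines[i:], the run lines[i:j] obtained as the quoted prefix.
def bqScan : List String → List String
  | [] => []
  | l :: ls =>
    if bqIsQuoted l then
      ("<blockquote>"
        ++ PySem.Str.join "\n" ((l :: ls.takeWhile bqIsQuoted).map bqStrip)
        ++ "</blockquote>") :: bqScan (ls.dropWhile bqIsQuoted)
    else
      l :: bqScan ls
termination_by ls => ls.length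
decreasing_by
  · exact Nat.lt_succ_of_le (List.length_dropWhile_le _ _)
  · exact Nat.lt_succ_self _

def convert_blockquotes_py_alt (text : String) : String :=
  PySem.Str.join "\n" (bqScan ((PySem.Str.split? text "\n").getD []))

-- ===== PRECONDITION & SPEC =====
def Spec_convert_blockquotes_py (text : String) (out : String) : Prop := out = convert_blockquotes_py_alt text
instance (text : String) (out : String) : Decidable (Spec_convert_blockquotes_py text out) := by unfold Spec_convert_blockquotes_py; infer_instance

-- ===== CLAIM (what is proved, stated in full; the proofs are below) =====
def Claim_equal_convert_blockquotes_py : Prop := ∀ (text : String), Dom_convert_blockquotes_py text → Spec_convert_blockquotes_py text (convert_blockquotes_py text)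

-- ===== LEMMAS AND PROOFS =====

-- A's final flush, applied to the loop state
def bqFinal (st : List String × List String) : List String :=
  if st.2 ≠ [] then
    st.1 ++ ["<blockquote>" ++ PySem.Str.join "\n" st.2 ++ "</blockquote>"]
  else st.1

-- what B produces from a pending buffer `buf` followed by the unprocessed lines
def bqMerge (buf : List String) (lines : List String) : List String :=
  if buf = [] then bqScan lines
  else
    ("<blockquote>"
      ++ PySem.Str.join "\n" (buf ++ (lines.takeWhile bqIsQuoted).map bqStrip)
      ++ "</blockquote>") :: bqScan (lines.dropWhile bqIsQuoted)

theorem bqScan_nil : bqScan [] = [] := by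
  rw [bqScan]

theorem bqMerge_nil (lines : List String) : bqMerge [] lines = bqScan lines := by
  simp [bqMerge]

theorem bqScan_cons_quoted (l : String) (ls : List String) (h : bqIsQuoted l = true) :
    bqScan (l :: ls) =
      ("<blockquote>"
        ++ PySem.Str.join "\n" ((l :: ls.takeWhile bqIsQuoted).map bqStrip)
        ++ "</blockquote>") :: bqScan (ls.dropWhile bqIsQuoted) := by
  rw [bqScan, if_pos h]

theorem bqScan_cons_not_quoted (l : String) (ls : List String) (h : ¬ bqIsQuoted l = true) :
    bqScan (l :: ls) = l :: bqScan ls := by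
  rw [bqScan, if_neg h]

-- loop invariant: flushing A's fold from any state (res, buf) equals res ++ bqMerge buf lines
theorem bq_foldl_merge (lines : List String) :
    ∀ (res buf : List String),
      bqFinal (lines.foldl bqStepA (res, buf)) = res ++ bqMerge buf lines := by
  induction lines with
  | nil =>
    intro res buf
    by_cases hb : buf = [] <;>
      simp [bqFinal, bqMerge, hb, bqScan_nil]
  | cons l ls ih =>
    intro res buf
    by_cases hq : bqIsQuoted l = true
    · have hstep : bqStepA (res, buf) l = (res, buf ++ [bqStrip l]) := by
        simp [bqStepA, bqIsQuoted, bqStrip] at hq ⊢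
        simp [hq]
      rw [List.foldl_cons, hstep, ih]
      by_cases hb : buf = []
      · subst hb
        simp [bqMerge, bqScan_cons_quoted l ls hq]
      · have : buf ++ [bqStrip l] ≠ [] := by simp
        simp [bqMerge, hb, this, hq]
    · have hstep : bqStepA (res, buf) l = (bqFinal (res, buf) ++ [l], []) := by
        simp [bqStepA, bqIsQuoted] at hq ⊢
        simp [hq, bqFinal]
      rw [List.foldl_cons, hstep, ih]
      by_cases hb : buf = []
      · subst hb
        simp [bqMerge, bqFinal, bqScan_cons_not_quoted l ls hq]
      · simp [bqMerge, bqFinal, hb, hq, bqScan_cons_not_quoted l ls hq]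

-- ===== VERDICT (by name: the statement is the Claim_ definition above) =====
theorem convert_blockquotes_py_spec : Claim_equal_convert_blockquotes_py := by
  intro text _
  show convert_blockquotes_py text = convert_blockquotes_py_alt text
  have h := bq_foldl_merge ((PySem.Str.split? text "\n").getD []) [] []
  simp only [bqMerge_nil, List.nil_append] at h
  exact congrArg (PySem.Str.join "\n") h
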